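-- pv_equiv track=rewrite | github.com/pohrebec/Algo | 5/5.11/t05_11_e2254.py | deliver
-- ===== SOURCE A (Python) =====
-- def deliver(x, B, k):
--     prefix_sum = [0] * (len(x) + 1)
--     for i in range(len(x)):
--         prefix_sum[i+1] = prefix_sum[i] + x[i]
--
--     for i in range(len(x) - k + 1):
--         mid = i + k // 2
--         median = x[mid]
--         left_count = mid - i
--         left_sum = prefix_sum[mid] - prefix_sum[i]
--         left_cost = median * left_count - left_sum
--         right_count = i + k - 1 - mid
--         right_sum = prefix_sum[i + k] - prefix_sum[mid + 1]
--         right_cost = right_sum - median * right_count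
--         total_cost = left_cost + right_cost
--
--         if total_cost <= B:
--             return True
--     return False
-- ===== SOURCE B (Python) =====
-- def deliver(x, B, k):
--     n = len(x)
--     for i in range(n - k + 1):
--         mid = i + k // 2
--         median = x[mid]
--         total = 0
--         for j in range(i, mid):
--             total += median - x[j]
--         for j in range(mid + 1, i + k):
--             total += x[j] - median
--         if total <= B:
--             return True
--     return False
-- ===== Notes on version B (the rewrite author's own statement) =====
-- stated objective: simpler
-- what changed: B drops A's prefix-sum array entirely and computes each window's cost by summing |median - x[j]| terms directly over the window, returning on the first window whose cost is <= B.
-- outside the precondition, e.g. on deliver([0, 2, 3, -2, -4], -2, -2): A returns True, B raises IndexError; on deliver([1, 2, 3], 100, -2): A returns True, B returns True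
import Mathlib
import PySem

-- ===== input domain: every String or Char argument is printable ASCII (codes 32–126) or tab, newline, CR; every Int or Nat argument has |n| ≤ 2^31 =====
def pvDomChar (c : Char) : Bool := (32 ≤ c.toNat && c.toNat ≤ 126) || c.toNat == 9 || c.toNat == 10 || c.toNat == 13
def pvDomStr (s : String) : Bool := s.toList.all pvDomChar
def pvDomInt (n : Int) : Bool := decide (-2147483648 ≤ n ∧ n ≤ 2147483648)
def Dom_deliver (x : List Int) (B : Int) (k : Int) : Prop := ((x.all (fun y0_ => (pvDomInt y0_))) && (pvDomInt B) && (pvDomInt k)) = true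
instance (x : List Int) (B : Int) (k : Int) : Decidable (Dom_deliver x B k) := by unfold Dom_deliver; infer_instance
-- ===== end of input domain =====

-- B replaces A's prefix-sum array with a direct per-window cost scan (objective: simpler).
-- ===== PORT A =====
-- Python list indices here are provably in range under Pre_deliver (1 ≤ k), so pyGetD's
-- default 0 is never used there; the prefix-sum loop writes ps[i+1] for 0 ≤ i < len(x).
def deliver (x : List Int) (B : Int) (k : Int) : Bool :=
  let ps : List Int := (PySem.List.pyRange 0 (x.length : Int) 1).foldl
      (fun ps i => ps.set (i + 1).toNat (PySem.List.pyGetD ps i 0 + PySem.List.pyGetD x i 0))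
      (List.replicate (x.length + 1) 0)
  (PySem.List.pyRange 0 ((x.length : Int) - k + 1) 1).any (fun i =>
    let mid := i + PySem.Int.floordiv k 2
    let median := PySem.List.pyGetD x mid 0
    let leftCount := mid - i
    let leftSum := PySem.List.pyGetD ps mid 0 - PySem.List.pyGetD ps i 0
    let leftCost := median * leftCount - leftSum
    let rightCount := i + k - 1 - mid
    let rightSum := PySem.List.pyGetD ps (i + k) 0 - PySem.List.pyGetD ps (mid + 1) 0
    let rightCost := rightSum - median * rightCount
    decide (leftCost + rightCost ≤ B))

-- ===== PORT B =====
def deliver_alt (x : List Int) (B : Int) (k : Int) : Bool :=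
  (PySem.List.pyRange 0 ((x.length : Int) - k + 1) 1).any (fun i =>
    let mid := i + PySem.Int.floordiv k 2
    let median := PySem.List.pyGetD x mid 0
    let t1 := (PySem.List.pyRange i mid 1).foldl
        (fun t j => t + (median - PySem.List.pyGetD x j 0)) 0
    let t2 := (PySem.List.pyRange (mid + 1) (i + k) 1).foldl
        (fun t j => t + (PySem.List.pyGetD x j 0 - median)) t1
    decide (t2 ≤ B))

-- ===== PRECONDITION & SPEC =====
-- Pre_ excludes nonpositive window sizes k ≤ 0, on which A's index x[mid] leaves the window:
-- A then raises IndexError on some inputs and on others returns an accidental value through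
-- Python's negative-index wraparound; B likewise raises or returns an accidental value there.
def Pre_deliver (x : List Int) (B : Int) (k : Int) : Prop := 1 ≤ k
instance (x : List Int) (B : Int) (k : Int) : Decidable (Pre_deliver x B k) := by unfold Pre_deliver; infer_instance
def pvWitness_deliver : List Int × Int × Int := ([5, 1, 4], 3, 2)
def Spec_deliver (x : List Int) (B : Int) (k : Int) (out : Bool) : Prop := out = deliver_alt x B k
instance (x : List Int) (B : Int) (k : Int) (out : Bool) : Decidable (Spec_deliver x B k out) := by unfold Spec_deliver; infer_instance

-- ===== CLAIM (what is proved, stated in full; the proofs are below) =====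
def Claim_equal_deliver : Prop := ∀ (x : List Int) (B : Int) (k : Int), Dom_deliver x B k → Pre_deliver x B k → Spec_deliver x B k (deliver x B k)

-- ===== LEMMAS AND PROOFS =====

-- partial sums of x: pvS x t = sum of the first t elements
def pvS (x : List Int) (t : Int) : Int := (x.take t.toNat).sum

theorem pvS_succ (x : List Int) (t : Int) (h0 : 0 ≤ t) (h1 : t < (x.length : Int)) :
    pvS x (t + 1) = pvS x t + x.getD t.toNat 0 := by
  unfold pvS
  have ht : (t + 1).toNat = t.toNat + 1 := by omega
  have hlt : t.toNat < x.length := by omega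
  rw [ht, List.sum_take_succ _ _ hlt]
  simp [List.getD, List.getElem?_eq_getElem hlt]

theorem pv_table_eq (x : List Int) :
    (List.range (x.length + 1)).map (fun j : Nat => pvS x (j : Int))
      = (PySem.List.pyRange 0 ((x.length : Int) + 1) 1).map (fun j => pvS x j) := by
  rw [PySem.List.pyRange_one]
  have h1 : (((x.length : Int) + 1 - 0)).toNat = x.length + 1 := by omega
  rw [h1, List.map_map]
  apply List.map_congr_left
  intro a _
  simp

-- A's prefix-sum loop builds exactly the partial-sums table
theorem pv_prefix_fold (x : List Int) :
    (PySem.List.pyRange 0 (x.length : Int) 1).foldl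
      (fun ps i => ps.set (i + 1).toNat (PySem.List.pyGetD ps i 0 + PySem.List.pyGetD x i 0))
      (List.replicate (x.length + 1) 0)
    = (List.range (x.length + 1)).map (fun j : Nat => pvS x (j : Int)) := by
  suffices h : ∀ m : Nat, m ≤ x.length →
      (PySem.List.pyRange 0 (m : Int) 1).foldl
        (fun ps i => ps.set (i + 1).toNat (PySem.List.pyGetD ps i 0 + PySem.List.pyGetD x i 0))
        (List.replicate (x.length + 1) 0)
      = (List.range (m + 1)).map (fun j : Nat => pvS x (j : Int)) ++ List.replicate (x.length - m) 0 by
    have := h x.length le_rfl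
    simpa using this
  intro m hm
  induction m with
  | zero =>
      simp only [Nat.cast_zero]
      rw [PySem.List.pyRange_one_eq_nil le_rfl]
      simp only [List.foldl_nil, List.range_succ, List.range_zero]
      have hx : x.length + 1 = (x.length - 0) + 1 := by omega
      rw [hx, List.replicate_succ]
      simp [pvS]
  | succ m ih =>
      have hm' : m ≤ x.length := by omega
      have hmlt : m < x.length := by omega
      have hsplit : PySem.List.pyRange 0 ((m + 1 : Nat) : Int) 1
          = PySem.List.pyRange 0 (m : Int) 1 ++ [(m : Int)] := by
        have hc : ((m + 1 : Nat) : Int) = (m : Int) + 1 := by push_cast; ring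
        rw [hc]
        exact PySem.List.pyRange_one_succ_right (by positivity)
      rw [hsplit, List.foldl_append, ih hm']
      simp only [List.foldl_cons, List.foldl_nil]
      have hlenA : ((List.range (m + 1)).map (fun j : Nat => pvS x (j : Int))).length = m + 1 := by simp
      have hread_ps : PySem.List.pyGetD
          ((List.range (m + 1)).map (fun j : Nat => pvS x (j : Int)) ++ List.replicate (x.length - m) 0)
          (m : Int) 0 = pvS x (m : Int) := by
        rw [PySem.List.pyGetD_natCast]
        have hlt : m < ((List.range (m + 1)).map (fun j : Nat => pvS x (j : Int)) ++ List.replicate (x.length - m) 0).length := by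
          simp
          omega
        rw [List.getD_eq_getElem _ _ hlt, List.getElem_append_left (by omega)]
        simp
      have hread_x : PySem.List.pyGetD x (m : Int) 0 = x.getD m 0 := by
        rw [PySem.List.pyGetD_natCast]
      rw [hread_ps, hread_x]
      have hset : (((m : Int)) + 1).toNat = m + 1 := by omega
      rw [hset, List.set_append_right _ _ (by omega), hlenA]
      have hrep : x.length - m = (x.length - (m + 1)) + 1 := by omega
      rw [hrep, List.replicate_succ]
      have hz : m + 1 - (m + 1) = 0 := by omega
      rw [hz, List.set_cons_zero]
      have hS : pvS x (m : Int) + x.getD m 0 = pvS x ((m + 1 : Nat) : Int) := by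
        have hstep := pvS_succ x (m : Int) (by positivity) (by exact_mod_cast hmlt)
        push_cast
        rw [hstep]
        simp
      rw [List.range_succ (n := m + 1)]
      simp [List.getD] at hS
      simp [hS]

-- sum over a range of indices of x equals a difference of partial sums
theorem pv_sum_range (x : List Int) (a b : Int) (ha : 0 ≤ a) (hb : b ≤ (x.length : Int)) (hab : a ≤ b) :
    ((PySem.List.pyRange a b 1).map (fun j => PySem.List.pyGetD x j 0)).sum = pvS x b - pvS x a := by
  have hd : ∃ d : Nat, b = a + d := ⟨(b - a).toNat, by omega⟩
  obtain ⟨d, rfl⟩ := hd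
  clear hab
  induction d with
  | zero =>
      rw [PySem.List.pyRange_one_eq_nil (by omega)]
      simp
  | succ d ih =>
      have h1 : a + ((d + 1 : Nat) : Int) = (a + d) + 1 := by push_cast; ring
      rw [h1, PySem.List.pyRange_one_succ_right (by omega)]
      rw [List.map_append, List.sum_append]
      have hb' : a + (d : Int) ≤ (x.length : Int) := by push_cast at hb ⊢; omega
      rw [ih hb']
      have hget : PySem.List.pyGetD x (a + (d : Int)) 0 = x.getD (a + (d : Int)).toNat 0 :=
        PySem.List.pyGetD_of_nonneg x 0 (by omega)
      have hS := pvS_succ x (a + (d : Int)) (by omega) (by push_cast at hb ⊢; omega)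
      simp [hget, hS]
      ring

-- per-window: A's prefix-sum cost equals B's direct scan
theorem pv_window_eq (x : List Int) (k i : Int) (hk : 1 ≤ k)
    (hi0 : 0 ≤ i) (hi1 : i < (x.length : Int) - k + 1)
    (mid : Int) (hmid : mid = i + PySem.Int.floordiv k 2)
    (T : List Int) (hT : T = (List.range (x.length + 1)).map (fun j : Nat => pvS x (j : Int))) :
    PySem.List.pyGetD x mid 0 * (mid - i)
        - (PySem.List.pyGetD T mid 0 - PySem.List.pyGetD T i 0)
      + (PySem.List.pyGetD T (i + k) 0 - PySem.List.pyGetD T (mid + 1) 0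
        - PySem.List.pyGetD x mid 0 * (i + k - 1 - mid))
    = (PySem.List.pyRange (mid + 1) (i + k) 1).foldl
        (fun t j => t + (PySem.List.pyGetD x j 0 - PySem.List.pyGetD x mid 0))
        ((PySem.List.pyRange i mid 1).foldl
          (fun t j => t + (PySem.List.pyGetD x mid 0 - PySem.List.pyGetD x j 0)) 0) := by
  have hfd : PySem.Int.floordiv k 2 = k / 2 := PySem.Int.floordiv_eq_ediv_of_pos (by omega)
  have hmb : i ≤ mid ∧ mid ≤ i + k - 1 := by
    constructor <;> · rw [hmid, hfd]; omega
  have hn : i + k ≤ (x.length : Int) := by omega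
  set median := PySem.List.pyGetD x mid 0 with hmed
  have hps : ∀ t : Int, 0 ≤ t → t ≤ (x.length : Int) →
      PySem.List.pyGetD T t 0 = pvS x t := by
    intro t h0 h1
    rw [hT, pv_table_eq]
    exact PySem.List.pyGetD_map_pyRange_of_nonneg (fun j => pvS x j) ((x.length : Int) + 1) t 0 h0 (by omega)
  rw [PySem.List.foldl_add, PySem.List.foldl_add]
  have hsum1 : ((PySem.List.pyRange i mid 1).map (fun j => median - PySem.List.pyGetD x j 0)).sum
      = median * (mid - i) - (pvS x mid - pvS x i) := by
    have hsub : ((PySem.List.pyRange i mid 1).map (fun j => median - PySem.List.pyGetD x j 0)).sum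
        = ((PySem.List.pyRange i mid 1).map (fun _ => median)).sum
          - ((PySem.List.pyRange i mid 1).map (fun j => PySem.List.pyGetD x j 0)).sum := by
      induction (PySem.List.pyRange i mid 1) with
      | nil => simp
      | cons h t iht => simp [iht]; ring
    rw [hsub, pv_sum_range x i mid hi0 (by omega) hmb.1]
    rw [PySem.List.sum_map_const_int, PySem.List.length_pyRange_one]
    have hc : ((mid - i).toNat : Int) = mid - i := by omega
    rw [hc]
    ring
  have hsum2 : ((PySem.List.pyRange (mid + 1) (i + k) 1).map (fun j => PySem.List.pyGetD x j 0 - median)).sum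
      = (pvS x (i + k) - pvS x (mid + 1)) - median * (i + k - 1 - mid) := by
    have hsub : ((PySem.List.pyRange (mid + 1) (i + k) 1).map (fun j => PySem.List.pyGetD x j 0 - median)).sum
        = ((PySem.List.pyRange (mid + 1) (i + k) 1).map (fun j => PySem.List.pyGetD x j 0)).sum
          - ((PySem.List.pyRange (mid + 1) (i + k) 1).map (fun _ => median)).sum := by
      induction (PySem.List.pyRange (mid + 1) (i + k) 1) with
      | nil => simp
      | cons h t iht => simp [iht]; ring
    rw [hsub, pv_sum_range x (mid + 1) (i + k) (by omega) hn (by omega)]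
    rw [PySem.List.sum_map_const_int, PySem.List.length_pyRange_one]
    have hc : ((i + k - (mid + 1)).toNat : Int) = i + k - 1 - mid := by omega
    rw [hc]
    ring
  rw [hsum1, hsum2]
  rw [hps mid (by omega) (by omega), hps i hi0 (by omega),
      hps (i + k) (by omega) hn, hps (mid + 1) (by omega) (by omega)]
  ring

-- ===== VERDICT (by name: the statement is the Claim_ definition above) =====
theorem deliver_spec : Claim_equal_deliver := by
  intro x B k _hdom hk
  unfold Spec_deliver deliver deliver_alt
  simp only []
  rw [pv_prefix_fold]
  apply PySem.List.any_congr_mem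
  intro i hi
  rw [PySem.List.mem_pyRange_one] at hi
  congr 1
  rw [pv_window_eq x k i hk hi.1 hi.2 _ rfl _ rfl]
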